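-- pv_equiv track=rewrite | github.com/jiminchur/BaekjoonCodingTest | 백준/Silver/1195. 킥다운/킥다운.py | min_width
-- ===== SOURCE A (Python) =====
-- def is_compatible(g1, g2, offset):
--     """
--     offset: g2가 g1보다 오른쪽으로 얼마나 이동했는지
--     """
--     for i in range(len(g2)):
--         if 0 <= offset + i < len(g1):
--             if g1[offset + i] == '2' and g2[i] == '2':
--                 return False
--     return True
--
-- def min_width(g1, g2):
--     min_len = len(g1) + len(g2)
--
--     # g2가 g1 왼쪽으로 겹칠 수도 있음 (offset < 0)
--     for offset in range(-len(g2), len(g1) + 1):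
--         if is_compatible(g1, g2, offset):
--             left = min(offset, 0)
--             right = max(len(g1), offset + len(g2))
--             min_len = min(min_len, right - left)
--
--     return min_len
-- ===== SOURCE B (Python) =====
-- def min_width(g1, g2):
--     n, m = len(g1), len(g2)
--     t1 = [i for i, c in enumerate(g1) if c == '2']
--     t2 = [j for j, c in enumerate(g2) if c == '2']
--     bad = {p - q for p in t1 for q in t2}
--     best = n + m
--     for off in range(-m, n + 1):
--         if off not in bad:
--             w = max(n, off + m) - min(off, 0)
--             if w < best:
--                 best = w
--     return best
-- ===== Notes on version B (the rewrite author's own statement) =====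
-- stated objective: faster
-- what changed: Instead of rescanning both strings at every offset, B precomputes the '2'-positions of each string once, builds the set of forbidden offsets as their pairwise differences, and then picks the minimal width in a single pass over offsets with an O(1) set lookup.
import Mathlib
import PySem

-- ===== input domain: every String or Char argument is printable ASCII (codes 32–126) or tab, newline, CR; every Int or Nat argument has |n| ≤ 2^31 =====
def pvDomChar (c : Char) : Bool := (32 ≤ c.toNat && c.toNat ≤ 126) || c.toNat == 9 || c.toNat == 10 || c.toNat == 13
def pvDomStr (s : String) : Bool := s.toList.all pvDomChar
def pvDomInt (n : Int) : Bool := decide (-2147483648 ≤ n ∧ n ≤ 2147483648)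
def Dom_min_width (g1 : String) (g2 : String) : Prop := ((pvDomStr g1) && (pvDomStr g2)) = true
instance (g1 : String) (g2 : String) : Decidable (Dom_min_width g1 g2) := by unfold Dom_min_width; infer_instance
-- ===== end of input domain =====

-- B replaces A's per-offset rescan of both strings by a precomputed set of forbidden
-- offsets (differences of '2'-positions), then a single O(1)-lookup pass over the offsets (objective: faster; measured).

-- ===== PORT A =====
-- for i in range(len(g2)): if 0 <= offset+i < len(g1): if g1[offset+i]=='2' and g2[i]=='2': return False
def isCompatAux (l1 l2 : List Char) (offset : Int) : List Int → Bool
  | [] => true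
  | i :: rest =>
    if 0 ≤ offset + i ∧ offset + i < (l1.length : Int) then
      if PySem.List.pyGetD l1 (offset + i) ' ' = '2' ∧ PySem.List.pyGetD l2 i ' ' = '2' then
        false
      else isCompatAux l1 l2 offset rest
    else isCompatAux l1 l2 offset rest

def is_compatible (g1 g2 : String) (offset : Int) : Bool :=
  isCompatAux g1.toList g2.toList offset (PySem.List.pyRange 0 (g2.toList.length : Int) 1)

def min_width (g1 : String) (g2 : String) : Int :=
  let n : Int := g1.toList.length
  let m : Int := g2.toList.length
  (PySem.List.pyRange (-m) (n + 1) 1).foldl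
    (fun acc off =>
      if is_compatible g1 g2 off then
        min acc (max n (off + m) - min off 0)
      else acc)
    (n + m)

-- ===== PORT B =====
-- [i for i, c in enumerate(s) if c == '2']
def twos (l : List Char) : List Int :=
  (PySem.List.enumerate l 0).filterMap (fun p => if p.2 = '2' then some p.1 else none)

def min_width_alt (g1 : String) (g2 : String) : Int :=
  let n : Int := g1.toList.length
  let m : Int := g2.toList.length
  let bad : PySem.Set Int :=
    PySem.Set.ofList ((twos g1.toList).flatMap (fun p => (twos g2.toList).map (fun q => p - q)))
  (PySem.List.pyRange (-m) (n + 1) 1).foldl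
    (fun best off =>
      if PySem.Set.contains bad off then best
      else if max n (off + m) - min off 0 < best then max n (off + m) - min off 0 else best)
    (n + m)

-- ===== PRECONDITION & SPEC =====
def Spec_min_width (g1 : String) (g2 : String) (out : Int) : Prop := out = min_width_alt g1 g2
instance (g1 : String) (g2 : String) (out : Int) : Decidable (Spec_min_width g1 g2 out) := by unfold Spec_min_width; infer_instance

-- ===== CLAIM (what is proved, stated in full; the proofs are below) =====
def Claim_equal_min_width : Prop := ∀ (g1 : String) (g2 : String), Dom_min_width g1 g2 → Spec_min_width g1 g2 (min_width g1 g2)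

-- ===== LEMMAS AND PROOFS =====

-- which pairs enumerate produces
theorem mem_enum (l : List Char) (s i : Int) (c : Char) :
    (i, c) ∈ PySem.List.enumerate l s ↔
    ∃ k : Nat, k < l.length ∧ i = s + k ∧ l[k]? = some c := by
  induction l generalizing s with
  | nil => simp [PySem.List.enumerate]
  | cons x t ih =>
    rw [PySem.List.enumerate_cons]
    simp only [List.mem_cons, Prod.mk.injEq, ih]
    constructor
    · rintro (⟨rfl, rfl⟩ | ⟨k, hk, rfl, hget⟩)
      · exact ⟨0, by simp⟩
      · exact ⟨k + 1, by simp only [List.length_cons]; omega, by push_cast; ring, by simpa using hget⟩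
    · rintro ⟨k, hk, rfl, hget⟩
      cases k with
      | zero =>
        left
        simp only [List.getElem?_cons_zero, Option.some.injEq] at hget
        exact ⟨by simp, hget.symm⟩
      | succ k =>
        right
        exact ⟨k, by simp only [List.length_cons] at hk; omega, by push_cast; ring, by simpa using hget⟩

-- membership in the '2'-position comprehension
theorem mem_twos (l : List Char) (p : Int) :
    p ∈ twos l ↔ ∃ k : Nat, k < l.length ∧ p = (k : Int) ∧ l[k]? = some '2' := by
  unfold twos
  rw [List.mem_filterMap]
  constructor
  · rintro ⟨⟨i, c⟩, hmem, hf⟩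
    by_cases hc : c = '2'
    · subst hc
      simp at hf
      subst hf
      simpa using (mem_enum l 0 i '2').mp hmem
    · simp [hc] at hf
  · rintro ⟨k, hk, rfl, hget⟩
    exact ⟨((k : Int), '2'), (mem_enum l 0 _ _).mpr ⟨k, hk, by simp, hget⟩, by simp⟩

-- A's inner loop over an index list returns true iff no listed index clashes
theorem compatAux_iff (l1 l2 : List Char) (off : Int) (is : List Int) :
    isCompatAux l1 l2 off is = true ↔
    ∀ i ∈ is, ¬(0 ≤ off + i ∧ off + i < (l1.length : Int) ∧
      PySem.List.pyGetD l1 (off + i) ' ' = '2' ∧ PySem.List.pyGetD l2 i ' ' = '2') := by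
  induction is with
  | nil => simp [isCompatAux]
  | cons i rest ih =>
    simp only [isCompatAux, List.mem_cons]
    split_ifs with h1 h2
    · simp only [false_iff]
      intro H
      exact H i (Or.inl rfl) ⟨h1.1, h1.2, h2.1, h2.2⟩
    · rw [ih]
      constructor
      · rintro H i' (rfl | hi')
        · tauto
        · exact H i' hi'
      · intro H i' hi'
        exact H i' (Or.inr hi')
    · rw [ih]
      constructor
      · rintro H i' (rfl | hi')
        · tauto
        · exact H i' hi'
      · intro H i' hi'
        exact H i' (Or.inr hi')

-- the forbidden-offset set of B captures exactly A's incompatibility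
theorem compat_iff_not_bad (g1 g2 : String) (off : Int) :
    is_compatible g1 g2 off = true ↔
    off ∉ (twos g1.toList).flatMap (fun p => (twos g2.toList).map (fun q => p - q)) := by
  rw [is_compatible, compatAux_iff]
  constructor
  · intro H hbad
    rw [List.mem_flatMap] at hbad
    obtain ⟨p, hp, hmap⟩ := hbad
    rw [List.mem_map] at hmap
    obtain ⟨q, hq, hoff⟩ := hmap
    rw [mem_twos] at hp hq
    obtain ⟨k1, hk1, rfl, hg1⟩ := hp
    obtain ⟨k2, hk2, rfl, hg2⟩ := hq
    refine H (k2 : Int) (by rw [PySem.List.mem_pyRange_one]; omega) ?_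
    refine ⟨by omega, by omega, ?_, ?_⟩
    · rw [show (off + (k2 : Int)) = (k1 : Int) by omega,
        PySem.List.pyGetD_eq_getElem _ _ (by omega) (by omega)]
      simp only [Int.toNat_natCast]
      exact (List.getElem?_eq_some_iff.mp hg1).2
    · rw [PySem.List.pyGetD_eq_getElem _ _ (by omega) (by omega)]
      simp only [Int.toNat_natCast]
      exact (List.getElem?_eq_some_iff.mp hg2).2
  · intro H i hi hcl
    obtain ⟨h0, hn, h1, h2⟩ := hcl
    rw [PySem.List.mem_pyRange_one] at hi
    apply H
    rw [List.mem_flatMap]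
    refine ⟨off + i, ?_, ?_⟩
    · rw [mem_twos]
      refine ⟨(off + i).toNat, by omega, by omega, ?_⟩
      rw [List.getElem?_eq_some_iff]
      refine ⟨by omega, ?_⟩
      rw [PySem.List.pyGetD_eq_getElem _ _ (by omega) (by omega)] at h1
      exact h1
    · rw [List.mem_map]
      refine ⟨i, ?_, by omega⟩
      rw [mem_twos]
      refine ⟨i.toNat, by omega, by omega, ?_⟩
      rw [List.getElem?_eq_some_iff]
      refine ⟨by omega, ?_⟩
      rw [PySem.List.pyGetD_eq_getElem _ _ (by omega) (by omega)] at h2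
      exact h2

-- ===== VERDICT (by name: the statement is the Claim_ definition above) =====
theorem min_width_spec : Claim_equal_min_width := by
  intro g1 g2 _
  unfold Spec_min_width min_width min_width_alt
  have hfun :
      (fun (acc off : Int) =>
        if is_compatible g1 g2 off then
          min acc (max (g1.toList.length : Int) (off + g2.toList.length) - min off 0)
        else acc)
      = (fun (best off : Int) =>
        if PySem.Set.contains
            (PySem.Set.ofList ((twos g1.toList).flatMap (fun p => (twos g2.toList).map (fun q => p - q))))
            off then best
        else if max (g1.toList.length : Int) (off + g2.toList.length) - min off 0 < best then
          max (g1.toList.length : Int) (off + g2.toList.length) - min off 0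
        else best) := by
    funext acc off
    by_cases hc : is_compatible g1 g2 off = true
    · have hno := (compat_iff_not_bad g1 g2 off).mp hc
      have hcon : PySem.Set.contains
          (PySem.Set.ofList ((twos g1.toList).flatMap (fun p => (twos g2.toList).map (fun q => p - q)))) off
          = false := by
        simp only [PySem.Set.contains]
        rw [Bool.eq_false_iff]
        intro h
        exact hno ((PySem.Set.mem_ofList _ _).mp (List.contains_iff_mem.mp h))
      rw [hc, if_pos rfl, hcon, if_neg (by simp)]
      split_ifs with h <;> omega
    · have hbad : off ∈ (twos g1.toList).flatMap (fun p => (twos g2.toList).map (fun q => p - q)) := by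
        by_contra hno
        exact hc ((compat_iff_not_bad g1 g2 off).mpr hno)
      have hcon : PySem.Set.contains
          (PySem.Set.ofList ((twos g1.toList).flatMap (fun p => (twos g2.toList).map (fun q => p - q)))) off
          = true := by
        simp only [PySem.Set.contains]
        exact List.contains_iff_mem.mpr ((PySem.Set.mem_ofList _ _).mpr hbad)
      simp only [Bool.not_eq_true] at hc
      rw [hc, hcon]
      simp
  simp only [hfun]
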